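-- pv_equiv track=rewrite | github.com/anuragkaushik10/docs-doc | docs_doc/analysis/dependencies.py | _resolve_import_from_module
-- ===== SOURCE A (Python) =====
-- def _resolve_import_from_module(current_package: list[str], module: str | None, level: int) -> str | None:
--     if level == 0:
--         return module
--     anchor = list(current_package)
--     for _ in range(max(level - 1, 0)):
--         if anchor:
--             anchor.pop()
--     if module:
--         anchor.extend(module.split("."))
--     return ".".join(part for part in anchor if part)
-- ===== SOURCE B (Python) =====
-- def _join_nonempty(parts: list[str]) -> str:
--     out = ""
--     for p in parts:
--         if p:
--             if out:
--                 out += "." + p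
--             else:
--                 out = p
--     return out
--
--
-- def _resolve_import_from_module(current_package: list[str], module: str | None, level: int) -> str | None:
--     if level == 0:
--         return module
--     keep = len(current_package) - max(level - 1, 0)
--     parts = list(current_package[:max(keep, 0)])
--     if module:
--         parts += module.split(".")
--     return _join_nonempty(parts)
-- ===== Notes on version B (the rewrite author's own statement) =====
-- stated objective: alternative
-- what changed: Replaces the guarded pop-in-a-loop truncation with one closed-form slice current_package[:max(len-(level-1),0)], and replaces filter-then-'.'.join with a single forward fold that accumulates the dotted string, skipping empty parts as it goes.
import Mathlib
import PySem

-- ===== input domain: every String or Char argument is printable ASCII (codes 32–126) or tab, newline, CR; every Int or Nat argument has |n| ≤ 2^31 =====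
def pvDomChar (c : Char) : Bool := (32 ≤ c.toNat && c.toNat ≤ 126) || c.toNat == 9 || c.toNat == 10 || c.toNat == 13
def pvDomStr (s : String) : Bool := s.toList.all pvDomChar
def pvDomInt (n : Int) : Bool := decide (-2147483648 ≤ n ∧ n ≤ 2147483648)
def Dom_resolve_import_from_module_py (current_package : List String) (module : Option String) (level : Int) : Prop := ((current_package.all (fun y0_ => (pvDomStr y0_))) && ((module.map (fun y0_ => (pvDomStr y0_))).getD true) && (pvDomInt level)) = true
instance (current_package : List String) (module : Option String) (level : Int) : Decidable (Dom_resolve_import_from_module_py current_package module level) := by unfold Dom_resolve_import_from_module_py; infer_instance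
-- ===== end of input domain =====

-- B replaces A's guarded pop loop by one closed-form slice and the filter+join by a
-- single forward fold that accumulates the dotted string,
-- skipping empty parts (objective: alternative decomposition, same cost).

-- ===== PORT A =====
-- Port of A: copies the package, pops the last component (level-1) times guarded by
-- non-emptiness, extends with module.split(".") when module is truthy, joins non-empty parts.
def resolve_import_from_module_py (current_package : List String) (module : Option String) (level : Int) : Option String :=
  if level == 0 then module
  else
    let anchor := current_package
    let anchor := (PySem.List.pyRange 0 (max (level - 1) 0) 1).foldl
      (fun a _ => if a ≠ [] then a.dropLast else a) anchor
    let anchor :=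
      match module with
      | some m => if m ≠ "" then anchor ++ (PySem.Str.split? m ".").getD [] else anchor
      | none => anchor
    some (PySem.Str.join "." (anchor.filter (fun p => p ≠ "")))

-- ===== PORT B =====
-- Port of Source B's _join_nonempty: a single forward fold with a string accumulator,
-- dropping empty components and appending "." + p to the accumulator
-- (out += "." + p ported exactly as the concatenation of the character lists).
def joinNonempty (parts : List String) : String :=
  parts.foldl
    (fun out p =>
      if p = "" then out
      else if out = "" then p
      else String.ofList (out.toList ++ '.' :: p.toList)) ""

-- Port of B: one closed-form slice current_package[:max(len - max(level-1,0), 0)],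
-- then the recursive join above.
def resolve_import_from_module_py_alt (current_package : List String) (module : Option String) (level : Int) : Option String :=
  if level == 0 then module
  else
    let keep : Int := (current_package.length : Int) - max (level - 1) 0
    let parts := PySem.List.slice current_package none (some (max keep 0))
    let parts :=
      match module with
      | some m => if m ≠ "" then parts ++ (PySem.Str.split? m ".").getD [] else parts
      | none => parts
    some (joinNonempty parts)

-- ===== PRECONDITION & SPEC =====
def Spec_resolve_import_from_module_py (current_package : List String) (module : Option String) (level : Int) (out : Option String) : Prop := out = resolve_import_from_module_py_alt current_package module level
instance (current_package : List String) (module : Option String) (level : Int) (out : Option String) : Decidable (Spec_resolve_import_from_module_py current_package module level out) := by unfold Spec_resolve_import_from_module_py; infer_instance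

-- ===== CLAIM =====
def Claim_equal_resolve_import_from_module_py : Prop := ∀ (current_package : List String) (module : Option String) (level : Int), Dom_resolve_import_from_module_py current_package module level → Spec_resolve_import_from_module_py current_package module level (resolve_import_from_module_py current_package module level)

-- ===== LEMMAS AND PROOFS =====
-- Proof helper: the fold in joinNonempty, written as structural recursion.
def jrec : List String → String
  | [] => ""
  | head :: tail =>
    let rest := jrec tail
    if head = "" then rest
    else if rest = "" then head
    else String.ofList (head.toList ++ '.' :: rest.toList)

theorem ofList_app_cons_ne_empty (xs : List Char) (c : Char) (cs : List Char) :
    String.ofList (xs ++ c :: cs) ≠ "" := by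
  intro h
  have := congrArg String.toList h
  simp [String.toList_ofList] at this

-- Invariant of Source B's accumulator loop: folding from acc joins acc with jrec of the rest.
theorem foldl_join_acc (l : List String) : ∀ acc : String,
    l.foldl
      (fun out p =>
        if p = "" then out
        else if out = "" then p
        else String.ofList (out.toList ++ '.' :: p.toList)) acc
    = if acc = "" then jrec l
      else if jrec l = "" then acc
      else String.ofList (acc.toList ++ '.' :: (jrec l).toList) := by
  induction l with
  | nil =>
    intro acc
    by_cases ha : acc = "" <;> simp [jrec, ha]
  | cons h t ih =>
    intro acc
    rw [List.foldl_cons]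
    by_cases hh : h = ""
    · rw [if_pos hh, ih acc]
      have hjh : jrec (h :: t) = jrec t := by simp [jrec, hh]
      rw [hjh]
    · rw [if_neg hh]
      by_cases ha : acc = ""
      · subst ha
        rw [if_pos rfl, if_pos rfl, ih h, if_neg hh]
        by_cases hjt : jrec t = "" <;> simp [jrec, hh, hjt]
      · rw [if_neg ha, ih _, if_neg ha]
        have hacc' : String.ofList (acc.toList ++ '.' :: h.toList) ≠ "" :=
          ofList_app_cons_ne_empty _ _ _
        rw [if_neg hacc']
        by_cases hjt : jrec t = ""
        · have hjh : jrec (h :: t) = h := by simp [jrec, hh, hjt]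
          rw [if_pos hjt, hjh, if_neg hh]
        · have hjh : jrec (h :: t) =
              String.ofList (h.toList ++ '.' :: (jrec t).toList) := by
            simp [jrec, hh, hjt]
          rw [if_neg hjt, hjh, if_neg (ofList_app_cons_ne_empty _ _ _)]
          congr 1
          simp [String.toList_ofList]

theorem joinNonempty_eq_jrec (l : List String) : joinNonempty l = jrec l := by
  unfold joinNonempty
  rw [foldl_join_acc]
  simp
-- Popping the last element (when non-empty) m times is taking the first (length - m) elements.
theorem foldl_range_droplast (m : Nat) (xs : List String) :
    (List.range m).foldl (fun a (_ : Nat) => if a ≠ [] then a.dropLast else a) xs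
      = xs.take (xs.length - m) := by
  induction m with
  | zero => simp
  | succ m ih =>
    rw [List.range_succ, List.foldl_append, ih]
    by_cases h : m < xs.length
    · have hne : xs.take (xs.length - m) ≠ [] := by
        intro hc
        have := congrArg List.length hc
        simp at this
        omega
      simp only [List.foldl_cons, List.foldl_nil, hne, if_pos, ne_eq, not_false_eq_true,
        List.dropLast_eq_take, List.length_take, List.take_take]
      congr 1
      omega
    · have h0 : xs.length - m = 0 := by omega
      have h1 : xs.length - (m + 1) = 0 := by omega
      simp [h0, h1]

-- The recursive helper jrec equals filter-then-join-with-".".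
theorem jrec_eq (l : List String) :
    jrec l = PySem.Str.join "." (l.filter (fun p => p ≠ "")) := by
  induction l with
  | nil => simp [jrec, PySem.Str.join, PySem.Chars.join, List.intercalate]
  | cons head tail ih =>
    by_cases hh : head = ""
    · simp [jrec, hh, ih]
    · have hf : (head :: tail).filter (fun p => p ≠ "") =
          head :: tail.filter (fun p => p ≠ "") := by simp [hh]
      rw [hf]
      cases hft : tail.filter (fun p => p ≠ "") with
      | nil =>
        have hrest : jrec tail = "" := by
          rw [ih, hft]; simp [PySem.Str.join, PySem.Chars.join, List.intercalate]
        simp only [jrec, hrest, if_neg hh]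
        simp [PySem.Str.join, PySem.Chars.join, List.intercalate]
      | cons q qs =>
        have hq : q ≠ "" := by
          have := List.of_mem_filter (a := q) (l := tail) (by rw [hft]; exact List.mem_cons_self)
          simpa using this
        have hrest : jrec tail =
            String.ofList (List.intercalate ['.'] ((q :: qs).map String.toList)) := by
          rw [ih, hft]; rfl
        have hrne : jrec tail ≠ "" := by
          rw [hrest]
          intro hc
          have : List.intercalate ['.'] ((q :: qs).map String.toList) = ([] : List Char) := by
            have := congrArg String.toList hc
            simpa [String.toList_ofList] using this
          cases qs with
          | nil =>
            simp [List.intercalate] at this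
            exact hq (by cases q; simp_all [String.toList])
          | cons r rs =>
            have hcc : List.intercalate ['.'] (q.toList :: r.toList :: rs.map String.toList)
                = q.toList ++ ['.'] ++ List.intercalate ['.'] (r.toList :: rs.map String.toList) := by
              simp [List.intercalate, List.intersperse]
            simp [hcc] at this
        simp only [jrec, if_neg hh, if_neg hrne]
        rw [hrest]
        have htl : (String.ofList (List.intercalate ['.'] ((q :: qs).map String.toList))).toList
            = List.intercalate ['.'] ((q :: qs).map String.toList) := String.toList_ofList
        rw [htl]
        show String.ofList (head.toList ++ '.' :: List.intercalate ['.'] ((q :: qs).map String.toList))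
            = PySem.Str.join "." (head :: q :: qs)
        simp only [PySem.Str.join, PySem.Chars.join, List.map_cons]
        congr 1

theorem resolve_eq (current_package : List String) (module : Option String) (level : Int) :
    resolve_import_from_module_py current_package module level
      = resolve_import_from_module_py_alt current_package module level := by
  unfold resolve_import_from_module_py resolve_import_from_module_py_alt
  by_cases h0 : level = 0
  · simp [h0]
  · have hne : (level == 0) = false := by simpa using h0
    simp only [hne, Bool.false_eq_true, if_false]
    have hkeep : (0 : Int) ≤ max ((current_package.length : Int) - max (level - 1) 0) 0 :=
      le_max_right _ _
    rw [PySem.List.slice_to current_package hkeep]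
    rw [PySem.List.pyRange_one, List.foldl_map, foldl_range_droplast]
    have harith : current_package.length - (max (level - 1) 0 - 0).toNat
        = (max ((current_package.length : Int) - max (level - 1) 0) 0).toNat := by
      omega
    rw [harith]
    cases module with
    | none => rw [joinNonempty_eq_jrec, jrec_eq]
    | some m =>
      by_cases hm : m = "" <;> simp only [hm, if_pos, if_neg, ne_eq, not_true_eq_false,
        not_false_eq_true] <;> rw [joinNonempty_eq_jrec, jrec_eq]

-- ===== VERDICT =====
theorem resolve_import_from_module_py_spec : Claim_equal_resolve_import_from_module_py := by
  intro cp m lv _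
  exact resolve_eq cp m lv
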